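-- pv_equiv track=rewrite | github.com/roelschlaeger/usexmltodict | python_projects/chkio/family_gifts/checkio.py | prune_circular_duplicates
-- ===== SOURCE A (Python) =====
-- from collections import defaultdict, deque
--
-- def prune_circular_duplicates(input_paths):
--     """Remove paths that are duplicates after circularly shifting."""
--     output_paths = set()
--     for path in input_paths:
--         d = deque(path)
--         m = min([x for x in d])
--         while m != d[0]:
--             d.rotate(-1)
--         output_paths.add(tuple(d))
--     return list(output_paths)
-- ===== SOURCE B (Python) =====
-- def prune_circular_duplicates(input_paths):
--     """Remove paths that are duplicates after circularly shifting."""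
--     canonical = set()
--     for path in input_paths:
--         i = path.index(min(path))
--         canonical.add(tuple(path[i:]) + tuple(path[:i]))
--     return list(canonical)
-- ===== Notes on version B (the rewrite author's own statement) =====
-- stated objective: simpler
-- what changed: B replaces the deque rotate(-1) while-loop with a direct computation of the canonical rotation: i = index of the first minimum, canonical = path[i:] + path[:i].
import Mathlib
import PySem

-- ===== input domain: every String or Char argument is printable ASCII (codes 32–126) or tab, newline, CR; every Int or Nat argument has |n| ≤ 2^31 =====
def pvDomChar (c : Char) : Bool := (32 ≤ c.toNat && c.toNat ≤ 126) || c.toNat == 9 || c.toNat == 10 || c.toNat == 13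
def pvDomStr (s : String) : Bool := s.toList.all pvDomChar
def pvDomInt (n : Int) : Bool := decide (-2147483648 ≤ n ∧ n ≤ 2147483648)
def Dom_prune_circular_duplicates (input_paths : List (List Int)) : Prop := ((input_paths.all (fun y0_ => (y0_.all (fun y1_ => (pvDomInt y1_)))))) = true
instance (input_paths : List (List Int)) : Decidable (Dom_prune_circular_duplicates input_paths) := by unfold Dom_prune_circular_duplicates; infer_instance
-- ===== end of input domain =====

-- B replaces A's deque rotate(-1) while-loop by a direct computation of the canonical rotation
-- (index of first minimum + two slices); objective: simpler. Return-value equivalence on Pre_ (no empty path).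

-- ===== PORT A =====
-- the `while m != d[0]: d.rotate(-1)` loop; fuel bounds the rotations (the loop stops within
-- len(path) steps since m ∈ path); deque.rotate(-1) moves the front element to the back
def pvRotToMin (m : Int) : Nat → List Int → List Int
  | 0, d => d
  | Nat.succ f, d =>
      if PySem.List.pyGet? d 0 = some m then d
      else pvRotToMin m f (d.drop 1 ++ d.take 1)

def prune_circular_duplicates (input_paths : List (List Int)) : List (List Int) :=
  input_paths.foldl (fun output_paths path =>
    match PySem.List.min? path (fun x => x) with
    | none => output_paths        -- Python raises ValueError here; excluded by Pre_
    | some m => PySem.Set.add output_paths (pvRotToMin m path.length path))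
    PySem.Set.empty

-- ===== PORT B =====
def prune_circular_duplicates_alt (input_paths : List (List Int)) : List (List Int) :=
  input_paths.foldl (fun canonical path =>
    match PySem.List.min? path (fun x => x) with
    | none => canonical           -- Python raises ValueError here; excluded by Pre_
    | some m =>
      match PySem.List.index? path m with
      | none => canonical         -- unreachable: the minimum is a member of path
      | some i =>
        PySem.Set.add canonical
          (PySem.List.slice path (some (i : Int)) none ++
           PySem.List.slice path none (some (i : Int))))
    PySem.Set.empty

-- ===== PRECONDITION & SPEC =====
-- Pre_ excludes inputs that contain an empty path: min of an empty sequence raises ValueError in both A and B.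
def Pre_prune_circular_duplicates (input_paths : List (List Int)) : Prop :=
  ∀ p ∈ input_paths, p ≠ []
instance (input_paths : List (List Int)) : Decidable (Pre_prune_circular_duplicates input_paths) := by
  unfold Pre_prune_circular_duplicates; infer_instance

def pvWitness_prune_circular_duplicates : List (List Int) := [[2, 1, 3], [1, 3, 2], [3, 2, 1]]

def Spec_prune_circular_duplicates (input_paths : List (List Int)) (out : List (List Int)) : Prop := out = prune_circular_duplicates_alt input_paths
instance (input_paths : List (List Int)) (out : List (List Int)) : Decidable (Spec_prune_circular_duplicates input_paths out) := by unfold Spec_prune_circular_duplicates; infer_instance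

-- ===== CLAIM (what is proved, stated in full; the proofs are below) =====
def Claim_equal_prune_circular_duplicates : Prop := ∀ (input_paths : List (List Int)), Dom_prune_circular_duplicates input_paths → Pre_prune_circular_duplicates input_paths → Spec_prune_circular_duplicates input_paths (prune_circular_duplicates input_paths)

-- ===== LEMMAS AND PROOFS =====

-- the rotation loop, started on a ++ b with no minimum in a and the minimum at b's head,
-- moves a to the back
lemma pvRotToMin_eq (m : Int) :
    ∀ (a b : List Int) (fuel : Nat), (∀ x ∈ a, x ≠ m) → b.head? = some m →
      a.length ≤ fuel → pvRotToMin m fuel (a ++ b) = b ++ a := by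
  intro a
  induction a with
  | nil =>
    intro b fuel _ hb _
    cases fuel with
    | zero => simp [pvRotToMin]
    | succ f =>
      simp only [pvRotToMin, List.nil_append, List.append_nil]
      have : PySem.List.pyGet? b 0 = some m := by
        cases b with
        | nil => simp at hb
        | cons x t => simp at hb; simp [PySem.List.pyGet?, PySem.List.pyIdx?, hb]
      simp [this]
  | cons x a' ih =>
    intro b fuel ha hb hf
    cases fuel with
    | zero => simp at hf
    | succ f =>
      have hx : x ≠ m := ha x (by simp)
      have hget : PySem.List.pyGet? ((x :: a') ++ b) 0 = some x := by
        simp [PySem.List.pyGet?, PySem.List.pyIdx?]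
        rw [if_pos (by positivity)]
        simp
      have hbne : b ≠ [] := by intro h; subst h; simp at hb
      simp only [pvRotToMin, hget, Option.some.injEq]
      rw [if_neg (by simpa using hx)]
      have : ((x :: a') ++ b).drop 1 ++ ((x :: a') ++ b).take 1 = a' ++ (b ++ [x]) := by
        simp
      rw [this, ih (b ++ [x]) f (fun y hy => ha y (by simp [hy]))
            (by cases b with | nil => exact absurd rfl hbne | cons u t => simpa using hb)
            (by simpa using hf)]
      simp

-- on a nonempty path the two per-path steps coincide on every accumulator
lemma pvStep_eq (s : List (List Int)) (path : List Int) (hne : path ≠ []) :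
    (match PySem.List.min? path (fun x => x) with
      | none => s
      | some m => PySem.Set.add s (pvRotToMin m path.length path)) =
    (match PySem.List.min? path (fun x => x) with
      | none => s
      | some m =>
        match PySem.List.index? path m with
        | none => s
        | some i =>
          PySem.Set.add s
            (PySem.List.slice path (some (i : Int)) none ++
             PySem.List.slice path none (some (i : Int)))) := by
  obtain ⟨m, hm⟩ : ∃ m, PySem.List.min? path (fun x => x) = some m := by
    cases h : PySem.List.min? path (fun x => x) with
    | none => exact absurd ((PySem.List.min?_eq_none_iff _ _).1 h) hne
    | some m => exact ⟨m, rfl⟩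
  have hmem : m ∈ path := PySem.List.min?_mem hm
  obtain ⟨i, hi⟩ : ∃ i, PySem.List.index? path m = some i := by
    cases h : PySem.List.index? path m with
    | none => exact absurd ((PySem.List.index?_eq_none_iff _ _).1 h) (by simp [hmem])
    | some i => exact ⟨i, rfl⟩
  obtain ⟨pre, suf, hsplit, hlen, hnotin⟩ := (PySem.List.index?_eq_some_iff _ _ _).1 hi
  simp only [hm, hi]
  congr 1
  have hdrop : path.drop i = m :: suf := by
    rw [hsplit, ← hlen, List.drop_left' rfl]
  have htake : path.take i = pre := by
    rw [hsplit, ← hlen, List.take_left' rfl]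
  rw [PySem.List.slice_from_natCast, PySem.List.slice_to_natCast, hdrop, htake]
  have hrot : pvRotToMin m path.length path = (m :: suf) ++ pre := by
    have hlenfuel : pre.length ≤ path.length := by
      rw [hsplit]; simp
    calc pvRotToMin m path.length path
        = pvRotToMin m path.length (pre ++ (m :: suf)) := by rw [hsplit]
      _ = (m :: suf) ++ pre :=
          pvRotToMin_eq m pre (m :: suf) path.length
            (fun x hx hxm => hnotin (hxm ▸ hx)) (by simp) hlenfuel
  rw [hrot]

lemma pvFold_eq (l : List (List Int)) (h : ∀ p ∈ l, p ≠ []) :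
    ∀ s : List (List Int),
      l.foldl (fun output_paths path =>
        match PySem.List.min? path (fun x => x) with
        | none => output_paths
        | some m => PySem.Set.add output_paths (pvRotToMin m path.length path)) s =
      l.foldl (fun canonical path =>
        match PySem.List.min? path (fun x => x) with
        | none => canonical
        | some m =>
          match PySem.List.index? path m with
          | none => canonical
          | some i =>
            PySem.Set.add canonical
              (PySem.List.slice path (some (i : Int)) none ++
               PySem.List.slice path none (some (i : Int)))) s := by
  induction l with
  | nil => intro s; rfl
  | cons p t ih =>
    intro s
    simp only [List.foldl_cons]
    rw [pvStep_eq s p (h p (by simp))]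
    exact ih (fun q hq => h q (by simp [hq])) _

-- ===== VERDICT (by name: the statement is the Claim_ definition above) =====
theorem prune_circular_duplicates_spec : Claim_equal_prune_circular_duplicates := by
  intro input_paths _ hpre
  unfold Spec_prune_circular_duplicates prune_circular_duplicates prune_circular_duplicates_alt
  exact pvFold_eq input_paths hpre PySem.Set.empty
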